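-- pv_equiv track=rewrite | github.com/lawalton/csci3104 | ps5/huffman.py | countStringFrequencies
-- ===== SOURCE A (Python) =====
-- def countStringFrequencies(S):
--     prev = None
--     counter = - 1
--     f = []
--     for i in range(0, len(S)):
--         if (S[i] != prev):
--             counter += 1
--             f.append(0)
--         f[counter] += 1
--         prev = S[i]
--     return f
-- ===== SOURCE B (Python) =====
-- def countStringFrequencies(S):
--     f = []
--     i, n = 0, len(S)
--     while i < n:
--         j = i + 1
--         while j < n and S[j] == S[i]:
--             j += 1
--         f.append(j - i)
--         i = j
--     return f
-- ===== Notes on version B (the rewrite author's own statement) =====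
-- stated objective: simpler
-- what changed: Replaces the prev-sentinel/counter-index loop that appends 0 and increments f[counter] in place with a two-pointer scan that finds the end of each run and emits its length directly.
import Mathlib
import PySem

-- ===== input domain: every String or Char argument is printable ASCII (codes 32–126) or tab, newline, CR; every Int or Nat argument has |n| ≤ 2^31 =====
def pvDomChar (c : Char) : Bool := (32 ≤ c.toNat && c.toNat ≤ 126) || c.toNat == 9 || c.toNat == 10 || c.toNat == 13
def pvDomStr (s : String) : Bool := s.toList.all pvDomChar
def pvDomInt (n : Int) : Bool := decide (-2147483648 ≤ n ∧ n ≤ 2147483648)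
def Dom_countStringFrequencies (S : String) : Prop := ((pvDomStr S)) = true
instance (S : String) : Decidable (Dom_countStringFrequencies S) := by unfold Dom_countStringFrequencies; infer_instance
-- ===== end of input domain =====

-- B replaces A's prev-sentinel/counter loop (append 0, f[counter] += 1) with a two-pointer
-- run scan that emits each run's length directly; same simpler O(n), no speed claim.

-- ===== PORT A =====
-- one iteration of A's for-body: state (prev, counter, f), character S[i]
def csfStep (st : Option Char × Int × List Int) (c : Char) : Option Char × Int × List Int :=
  let (prev, counter, f) := st
  let (counter, f) := if some c ≠ prev then (counter + 1, f ++ [(0 : Int)]) else (counter, f)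
  let f := PySem.List.pySetD f counter (PySem.List.pyGetD f counter 0 + 1)
  (some c, counter, f)

def countStringFrequencies (S : String) : List Int :=
  ((PySem.List.pyRange 0 (S.toList.length : Int) 1).foldl
    (fun st i => csfStep st (PySem.List.pyGetD S.toList i ' ')) (none, -1, [])).2.2

-- ===== PORT B =====
-- the outer while loop: each step consumes one whole run (inner while = takeWhile/dropWhile)
def csfRuns : List Char → List Int
  | [] => []
  | c :: cs =>
    (((cs.takeWhile (fun d => d == c)).length : Int) + 1) :: csfRuns (cs.dropWhile (fun d => d == c))
termination_by l => l.length
decreasing_by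
  simp only [List.length_cons]
  exact Nat.lt_succ_of_le (List.length_dropWhile_le _ _)

def countStringFrequencies_alt (S : String) : List Int := csfRuns S.toList

-- ===== PRECONDITION & SPEC =====
def Spec_countStringFrequencies (S : String) (out : List Int) : Prop := out = countStringFrequencies_alt S
instance (S : String) (out : List Int) : Decidable (Spec_countStringFrequencies S out) := by unfold Spec_countStringFrequencies; infer_instance

-- ===== CLAIM (what is proved, stated in full; the proofs are below) =====
def Claim_equal_countStringFrequencies : Prop := ∀ (S : String), Dom_countStringFrequencies S → Spec_countStringFrequencies S (countStringFrequencies S)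

-- ===== LEMMAS AND PROOFS =====

-- A's loop from a state mid-run: prev = c, current run already counted n, f = acc ++ [n]
def runsFrom (c : Char) (n : Int) : List Char → List Int
  | [] => [n]
  | d :: t => if d = c then runsFrom c (n + 1) t else n :: runsFrom d 1 t

lemma pySetD_incr_last (acc : List Int) (n : Int) :
    PySem.List.pySetD (acc ++ [n]) (acc.length : Int)
      (PySem.List.pyGetD (acc ++ [n]) (acc.length : Int) 0 + 1) = acc ++ [n + 1] := by
  simp [PySem.List.pySetD_natCast, PySem.List.pyGetD_natCast, List.getD]

lemma foldl_csfStep (l : List Char) : ∀ (c : Char) (acc : List Int) (n : Int),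
    (l.foldl csfStep (some c, (acc.length : Int), acc ++ [n])).2.2 = acc ++ runsFrom c n l := by
  induction l with
  | nil => intro c acc n; simp [runsFrom]
  | cons d t ih =>
    intro c acc n
    by_cases hdc : d = c
    · subst hdc
      have hstep : csfStep (some d, (acc.length : Int), acc ++ [n]) d
          = (some d, (acc.length : Int), acc ++ [n + 1]) := by
        simp [csfStep]
      simp only [List.foldl_cons, hstep, runsFrom, if_true]
      exact ih d acc (n + 1)
    · have hstep : csfStep (some c, (acc.length : Int), acc ++ [n]) d
          = (some d, ((acc ++ [n]).length : Int), (acc ++ [n]) ++ [1]) := by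
        have h1 : (acc.length : Int) + 1 = ((acc ++ [n]).length : Int) := by
          simp
        have h2 : PySem.List.pySetD ((acc ++ [n]) ++ [(0:Int)]) ((acc ++ [n]).length : Int)
            (PySem.List.pyGetD ((acc ++ [n]) ++ [(0:Int)]) ((acc ++ [n]).length : Int) 0 + 1)
            = (acc ++ [n]) ++ [(1:Int)] := pySetD_incr_last (acc ++ [n]) 0
        have hcond : some d ≠ some c := by simp [hdc]
        simp only [csfStep, if_pos hcond, h1, List.append_assoc, List.singleton_append] at h2 ⊢
        rw [h2]
      simp only [List.foldl_cons, hstep]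
      rw [ih d (acc ++ [n]) 1]
      simp [runsFrom, hdc]

lemma runsFrom_eq (l : List Char) : ∀ (c : Char) (n : Int),
    runsFrom c n l = (n + ((l.takeWhile (fun d => d == c)).length : Int)) :: csfRuns (l.dropWhile (fun d => d == c)) := by
  induction l with
  | nil => intro c n; simp [runsFrom, csfRuns]
  | cons d t ih =>
    intro c n
    by_cases hdc : d = c
    · subst hdc
      simp only [runsFrom, List.takeWhile, List.dropWhile, beq_self_eq_true, if_true]
      rw [ih d (n + 1)]
      congr 1
      simp only [List.length_cons, Nat.cast_add, Nat.cast_one]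
      ring
    · have hb : (d == c) = false := by simp [hdc]
      simp only [runsFrom, if_neg hdc, List.takeWhile, List.dropWhile, hb]
      rw [ih d 1]
      rw [csfRuns]
      simp [add_comm]

-- ===== VERDICT (by name: the statement is the Claim_ definition above) =====
theorem countStringFrequencies_spec : Claim_equal_countStringFrequencies := by
  intro S _
  unfold Spec_countStringFrequencies countStringFrequencies countStringFrequencies_alt
  rw [PySem.List.foldl_pyRange_zero_pyGetD' S.toList ' ' csfStep (none, -1, [])]
  cases h : S.toList with
  | nil => simp [csfRuns]
  | cons c t =>
    have hfirst : csfStep (none, -1, ([] : List Int)) c = (some c, 0, [1]) := by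
      simp [csfStep, PySem.List.pySetD, PySem.List.pySet?, PySem.List.pyGetD, PySem.List.pyGet?,
        PySem.List.pyIdx?]
    simp only [List.foldl_cons, hfirst]
    have := foldl_csfStep t c [] 1
    simp only [List.nil_append, List.length_nil, Nat.cast_zero] at this
    rw [this, runsFrom_eq]
    simp [csfRuns, add_comm]
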